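-- pv_equiv track=rewrite | github.com/pypi-data/pypi-mirror-384 | packages/sys-scan-agent/sys_scan_agent-5.0.3.dev0.tar.gz/sys_scan_agent-5.0.3.dev0/sys_scan_agent/graph/utils.py | _determine_qualitative_risk
-- ===== SOURCE A (Python) =====
-- from typing import Any, Dict, List, Optional, Set, Tuple, TYPE_CHECKING
--
-- def _determine_qualitative_risk(sev_counters: Dict[str, int]) -> str:
--     """Determine overall qualitative risk level."""
--     qualitative = 'info'
--     order = ['critical', 'high', 'medium', 'low', 'info']
--     for level in order:
--         if sev_counters.get(level):
--             qualitative = level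
--             break
--     return qualitative
-- ===== SOURCE B (Python) =====
-- def _determine_qualitative_risk(sev_counters):
--     """Determine overall qualitative risk level."""
--     ranks = {'info': 0, 'low': 1, 'medium': 2, 'high': 3, 'critical': 4}
--     best = 'info'
--     best_rank = 0
--     for level, count in sev_counters.items():
--         r = ranks.get(level, -1)
--         if count and r > best_rank:
--             best = level
--             best_rank = r
--     return best
-- ===== Notes on version B (the rewrite author's own statement) =====
-- stated objective: alternative
-- what changed: B replaces A's priority-ordered scan over the fixed severity list (with dict lookups and an early break) by a single pass over the counter items computing an argmax of severity ranks.
import Mathlib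
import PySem

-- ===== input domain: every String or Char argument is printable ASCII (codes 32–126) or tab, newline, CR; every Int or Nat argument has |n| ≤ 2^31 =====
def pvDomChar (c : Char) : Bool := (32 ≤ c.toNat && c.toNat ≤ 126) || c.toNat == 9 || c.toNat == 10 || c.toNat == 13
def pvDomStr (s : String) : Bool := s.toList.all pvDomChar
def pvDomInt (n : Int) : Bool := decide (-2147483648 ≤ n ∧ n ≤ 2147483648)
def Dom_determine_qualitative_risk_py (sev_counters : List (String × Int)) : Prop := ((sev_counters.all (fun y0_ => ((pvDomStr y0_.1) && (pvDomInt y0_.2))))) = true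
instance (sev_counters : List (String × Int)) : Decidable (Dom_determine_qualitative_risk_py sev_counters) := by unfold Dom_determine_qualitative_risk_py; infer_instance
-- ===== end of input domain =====

-- B replaces A's priority-ordered scan over the fixed severity list (with dict lookups and an early
-- break) by a single pass over the counter items computing an argmax of severity ranks (alternative).

-- ===== PORT A =====
-- truthiness of sev_counters.get(level): some nonzero count
def pvTruthy (o : Option Int) : Bool :=
  match o with
  | some c => c != 0
  | none => false

-- the 'for level in order: if …: qualitative = level; break' loop (returns 'info' if no break)
def pvGoA (sc : List (String × Int)) : List String → String
  | [] => "info"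
  | l :: rest => if pvTruthy ((PySem.Dict.mk sc).get? l) then l else pvGoA sc rest

def determine_qualitative_risk_py (sev_counters : List (String × Int)) : String :=
  pvGoA sev_counters ["critical", "high", "medium", "low", "info"]

-- ===== PORT B =====
-- ranks.get(level, -1) for ranks = {'info':0,'low':1,'medium':2,'high':3,'critical':4}
def pvRank (s : String) : Int :=
  if s = "info" then 0 else if s = "low" then 1 else if s = "medium" then 2
  else if s = "high" then 3 else if s = "critical" then 4 else -1

def determine_qualitative_risk_py_alt (sev_counters : List (String × Int)) : String :=
  (sev_counters.foldl
    (fun st p => if p.2 ≠ 0 ∧ pvRank p.1 > st.2 then (p.1, pvRank p.1) else st)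
    ("info", (0 : Int))).1

-- ===== PRECONDITION & SPEC =====
-- Pre_ requires pairwise-distinct keys: only such association lists represent the Python dict
-- argument (a Python dict cannot hold duplicate keys), and on duplicate-key lists first-match
-- lookup (A) and full iteration (B) are both arbitrary choices.
def Pre_determine_qualitative_risk_py (sev_counters : List (String × Int)) : Prop :=
  (sev_counters.map Prod.fst).Nodup
instance (sev_counters : List (String × Int)) : Decidable (Pre_determine_qualitative_risk_py sev_counters) := by unfold Pre_determine_qualitative_risk_py; infer_instance

def pvWitness_determine_qualitative_risk_py : (List (String × Int)) :=
  [("low", 2), ("high", 0), ("medium", 1)]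

def Spec_determine_qualitative_risk_py (sev_counters : List (String × Int)) (out : String) : Prop := out = determine_qualitative_risk_py_alt sev_counters
instance (sev_counters : List (String × Int)) (out : String) : Decidable (Spec_determine_qualitative_risk_py sev_counters out) := by unfold Spec_determine_qualitative_risk_py; infer_instance

-- ===== CLAIM (what is proved, stated in full; the proofs are below) =====
def Claim_equal_determine_qualitative_risk_py : Prop := ∀ (sev_counters : List (String × Int)), Dom_determine_qualitative_risk_py sev_counters → Pre_determine_qualitative_risk_py sev_counters → Spec_determine_qualitative_risk_py sev_counters (determine_qualitative_risk_py sev_counters)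

-- ===== LEMMAS AND PROOFS =====

-- the running maximum of ranks of truthy entries, starting from r
def pvM (sc : List (String × Int)) (r : Int) : Int :=
  sc.foldl (fun a p => if p.2 ≠ 0 ∧ pvRank p.1 > a then pvRank p.1 else a) r

-- canonical level name of a rank
def pvName (m : Int) : String :=
  if m = 4 then "critical" else if m = 3 then "high" else if m = 2 then "medium"
  else if m = 1 then "low" else "info"

theorem pvM_ge : ∀ (sc : List (String × Int)) (r : Int), r ≤ pvM sc r := by
  intro sc
  induction sc with
  | nil => intro r; simp [pvM]
  | cons p rest ih =>
    intro r
    simp only [pvM, List.foldl_cons]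
    split_ifs with h
    · exact le_of_lt (lt_of_lt_of_le h.2 (ih (pvRank p.1)))
    · exact ih r

theorem pvName_rank (s : String) (h : 0 ≤ pvRank s) : pvName (pvRank s) = s := by
  unfold pvRank at *
  split_ifs at * with h1 h2 h3 h4 h5 <;> simp_all [pvName]

theorem pvM_cons (p : String × Int) (rest : List (String × Int)) (r : Int) :
    pvM (p :: rest) r
      = if p.2 ≠ 0 ∧ pvRank p.1 > r then pvM rest (pvRank p.1) else pvM rest r := by
  by_cases h : p.2 ≠ 0 ∧ pvRank p.1 > r <;> simp [pvM, h]

theorem pvFold_eq : ∀ (sc : List (String × Int)) (b : String) (r : Int), pvRank b = r →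
    (sc.foldl (fun st p => if p.2 ≠ 0 ∧ pvRank p.1 > st.2 then (p.1, pvRank p.1) else st) (b, r)).1
      = if pvM sc r ≤ r then b else pvName (pvM sc r) := by
  intro sc
  induction sc with
  | nil => intro b r hb; simp [pvM]
  | cons p rest ih =>
    intro b r hb
    rw [pvM_cons]
    by_cases h : p.2 ≠ 0 ∧ pvRank p.1 > r
    · simp only [List.foldl_cons, if_pos h]
      rw [ih p.1 (pvRank p.1) rfl]
      have hge := pvM_ge rest (pvRank p.1)
      have hgt : ¬ pvM rest (pvRank p.1) ≤ r := by omega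
      rw [if_neg hgt]
      by_cases h2 : pvM rest (pvRank p.1) ≤ pvRank p.1
      · have heq : pvM rest (pvRank p.1) = pvRank p.1 := le_antisymm h2 hge
        rw [if_pos h2, heq]
        have h0 : (0 : Int) ≤ pvRank p.1 := by
          have : (-1 : Int) ≤ r := by
            rw [← hb]; unfold pvRank; split_ifs <;> omega
          omega
        exact (pvName_rank p.1 h0).symm
      · rw [if_neg h2]
    · simp only [List.foldl_cons, if_neg h]
      exact ih b r hb

theorem pvAlt_eq (sc : List (String × Int)) :
    determine_qualitative_risk_py_alt sc
      = if pvM sc 0 ≤ 0 then "info" else pvName (pvM sc 0) := by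
  unfold determine_qualitative_risk_py_alt
  exact pvFold_eq sc "info" 0 (by norm_num [pvRank])

-- pvM ≥ k (k > r) iff some truthy entry has rank ≥ k
theorem pvM_ge_iff : ∀ (sc : List (String × Int)) (r k : Int), r < k →
    (k ≤ pvM sc r ↔ ∃ p ∈ sc, p.2 ≠ 0 ∧ k ≤ pvRank p.1) := by
  intro sc
  induction sc with
  | nil => intro r k hk; simp [pvM]; omega
  | cons p rest ih =>
    intro r k hk
    rw [pvM_cons]
    by_cases h : p.2 ≠ 0 ∧ pvRank p.1 > r
    · rw [if_pos h]
      constructor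
      · intro hM
        by_cases hr : k ≤ pvRank p.1
        · exact ⟨p, List.mem_cons_self, h.1, hr⟩
        · have := (ih (pvRank p.1) k (by omega)).mp hM
          obtain ⟨q, hq, hq2, hq3⟩ := this
          exact ⟨q, List.mem_cons_of_mem _ hq, hq2, hq3⟩
      · rintro ⟨q, hq, hq2, hq3⟩
        rcases List.mem_cons.mp hq with rfl | hq'
        · exact le_trans hq3 (pvM_ge rest (pvRank q.1))
        · by_cases hr : pvRank p.1 < k
          · exact (ih (pvRank p.1) k hr).mpr ⟨q, hq', hq2, hq3⟩
          · have := pvM_ge rest (pvRank p.1); omega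
    · rw [if_neg h]
      rw [ih r k hk]
      constructor
      · rintro ⟨q, hq, hq2, hq3⟩; exact ⟨q, List.mem_cons_of_mem _ hq, hq2, hq3⟩
      · rintro ⟨q, hq, hq2, hq3⟩
        rcases List.mem_cons.mp hq with rfl | hq'
        · exfalso; exact h ⟨hq2, by omega⟩
        · exact ⟨q, hq', hq2, hq3⟩

-- under Nodup keys, the truthiness of the first-match lookup equals "some entry with this key is nonzero"
theorem pvTruthy_get_iff (sc : List (String × Int)) (h : (sc.map Prod.fst).Nodup) (l : String) :
    pvTruthy ((PySem.Dict.mk sc).get? l) = true ↔ ∃ p ∈ sc, p.1 = l ∧ p.2 ≠ 0 := by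
  induction sc with
  | nil => simp [pvTruthy, PySem.Dict.get?]
  | cons p rest ih =>
    simp only [List.map_cons, List.nodup_cons] at h
    rw [PySem.Dict.get?_mk_cons]
    by_cases hl : p.1 = l
    · subst hl
      simp only [beq_self_eq_true, if_pos]
      constructor
      · intro ht
        refine ⟨p, List.mem_cons_self, rfl, ?_⟩
        simpa [pvTruthy] using ht
      · rintro ⟨q, hq, hq1, hq2⟩
        rcases List.mem_cons.mp hq with rfl | hq'
        · simpa [pvTruthy] using hq2
        · exact absurd (List.mem_map.mpr ⟨q, hq', hq1⟩) h.1
    · simp only [show (p.1 == l) = false by simpa using hl, Bool.false_eq_true, if_false]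
      rw [ih h.2]
      constructor
      · rintro ⟨q, hq, hq1, hq2⟩; exact ⟨q, List.mem_cons_of_mem _ hq, hq1, hq2⟩
      · rintro ⟨q, hq, hq1, hq2⟩
        rcases List.mem_cons.mp hq with rfl | hq'
        · exact absurd hq1 hl
        · exact ⟨q, hq', hq1, hq2⟩

theorem pvGoA_cons (sc : List (String × Int)) (l : String) (rest : List String) :
    pvGoA sc (l :: rest)
      = if pvTruthy ((PySem.Dict.mk sc).get? l) then l else pvGoA sc rest := rfl

-- pvRank boundaries: rank ≥ k names exactly the levels of rank ≥ k
theorem pvRank_ge4 (s : String) : (4 : Int) ≤ pvRank s ↔ s = "critical" := by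
  unfold pvRank; split_ifs <;> simp_all
theorem pvRank_ge3 (s : String) : (3 : Int) ≤ pvRank s ↔ s = "high" ∨ s = "critical" := by
  unfold pvRank; split_ifs <;> simp_all
theorem pvRank_ge2 (s : String) : (2 : Int) ≤ pvRank s ↔ s = "medium" ∨ s = "high" ∨ s = "critical" := by
  unfold pvRank; split_ifs <;> simp_all
theorem pvRank_ge1 (s : String) : (1 : Int) ≤ pvRank s ↔ s = "low" ∨ s = "medium" ∨ s = "high" ∨ s = "critical" := by
  unfold pvRank; split_ifs <;> simp_all

-- ===== VERDICT (by name: the statement is the Claim_ definition above) =====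
theorem determine_qualitative_risk_py_spec : Claim_equal_determine_qualitative_risk_py := by
  intro sc _ hpre
  unfold Spec_determine_qualitative_risk_py
  rw [pvAlt_eq]
  have hnd : (sc.map Prod.fst).Nodup := hpre
  -- abbreviations for 'level is present with nonzero count'
  have hit : ∀ l, pvTruthy ((PySem.Dict.mk sc).get? l) = true ↔ ∃ p ∈ sc, p.1 = l ∧ p.2 ≠ 0 :=
    pvTruthy_get_iff sc hnd
  have hM := pvM_ge sc 0
  unfold determine_qualitative_risk_py
  rw [pvGoA_cons]
  by_cases h4 : ∃ p ∈ sc, p.1 = "critical" ∧ p.2 ≠ 0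
  · have hM4 : (4 : Int) ≤ pvM sc 0 := by
      rw [pvM_ge_iff sc 0 4 (by norm_num)]
      obtain ⟨p, hp, h1, h2⟩ := h4
      exact ⟨p, hp, h2, (pvRank_ge4 p.1).mpr h1⟩
    have hM4' : pvM sc 0 = 4 := by
      have : pvM sc 0 ≤ 4 ∨ (5:Int) ≤ pvM sc 0 := by omega
      rcases this with h | h
      · omega
      · obtain ⟨p, _, _, hr⟩ := (pvM_ge_iff sc 0 5 (by norm_num)).mp h
        exfalso; unfold pvRank at hr; split_ifs at hr <;> omega
    rw [if_pos ((hit "critical").mpr h4), hM4']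
    norm_num [pvName]
  · rw [if_neg (by simpa [hit "critical"] using h4), pvGoA_cons]
    by_cases h3 : ∃ p ∈ sc, p.1 = "high" ∧ p.2 ≠ 0
    · have hM3 : pvM sc 0 = 3 := by
        have hge : (3 : Int) ≤ pvM sc 0 := by
          rw [pvM_ge_iff sc 0 3 (by norm_num)]
          obtain ⟨p, hp, h1, h2⟩ := h3
          exact ⟨p, hp, h2, (pvRank_ge3 p.1).mpr (Or.inl h1)⟩
        have hlt : ¬ (4 : Int) ≤ pvM sc 0 := by
          intro hc
          obtain ⟨p, hp, hp2, hr⟩ := (pvM_ge_iff sc 0 4 (by norm_num)).mp hc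
          exact h4 ⟨p, hp, (pvRank_ge4 p.1).mp hr, hp2⟩
        omega
      rw [if_pos ((hit "high").mpr h3), hM3]
      norm_num [pvName]
    · rw [if_neg (by simpa [hit "high"] using h3), pvGoA_cons]
      by_cases h2 : ∃ p ∈ sc, p.1 = "medium" ∧ p.2 ≠ 0
      · have hM2 : pvM sc 0 = 2 := by
          have hge : (2 : Int) ≤ pvM sc 0 := by
            rw [pvM_ge_iff sc 0 2 (by norm_num)]
            obtain ⟨p, hp, hp1, hp2⟩ := h2
            exact ⟨p, hp, hp2, (pvRank_ge2 p.1).mpr (Or.inl hp1)⟩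
          have hlt : ¬ (3 : Int) ≤ pvM sc 0 := by
            intro hc
            obtain ⟨p, hp, hp2, hr⟩ := (pvM_ge_iff sc 0 3 (by norm_num)).mp hc
            rcases (pvRank_ge3 p.1).mp hr with h | h
            · exact h3 ⟨p, hp, h, hp2⟩
            · exact h4 ⟨p, hp, h, hp2⟩
          omega
        rw [if_pos ((hit "medium").mpr h2), hM2]
        norm_num [pvName]
      · rw [if_neg (by simpa [hit "medium"] using h2), pvGoA_cons]
        by_cases h1 : ∃ p ∈ sc, p.1 = "low" ∧ p.2 ≠ 0
        · have hM1 : pvM sc 0 = 1 := by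
            have hge : (1 : Int) ≤ pvM sc 0 := by
              rw [pvM_ge_iff sc 0 1 (by norm_num)]
              obtain ⟨p, hp, hp1, hp2⟩ := h1
              exact ⟨p, hp, hp2, (pvRank_ge1 p.1).mpr (Or.inl hp1)⟩
            have hlt : ¬ (2 : Int) ≤ pvM sc 0 := by
              intro hc
              obtain ⟨p, hp, hp2, hr⟩ := (pvM_ge_iff sc 0 2 (by norm_num)).mp hc
              rcases (pvRank_ge2 p.1).mp hr with h | h | h
              · exact h2 ⟨p, hp, h, hp2⟩
              · exact h3 ⟨p, hp, h, hp2⟩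
              · exact h4 ⟨p, hp, h, hp2⟩
            omega
          rw [if_pos ((hit "low").mpr h1), hM1]
          norm_num [pvName]
        · rw [if_neg (by simpa [hit "low"] using h1), pvGoA_cons]
          have hM0 : pvM sc 0 = 0 := by
            have hlt : ¬ (1 : Int) ≤ pvM sc 0 := by
              intro hc
              obtain ⟨p, hp, hp2, hr⟩ := (pvM_ge_iff sc 0 1 (by norm_num)).mp hc
              rcases (pvRank_ge1 p.1).mp hr with h | h | h | h
              · exact h1 ⟨p, hp, h, hp2⟩
              · exact h2 ⟨p, hp, h, hp2⟩
              · exact h3 ⟨p, hp, h, hp2⟩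
              · exact h4 ⟨p, hp, h, hp2⟩
            omega
          rw [hM0]
          -- both the 'info'-hit branch and the fall-through return "info"
          simp [pvGoA]
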